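-- pv_equiv track=rewrite | github.com/JooHyeYeo/LiquidBiopsy | Bowtie/bowtie_MM.py | _expand_n
-- ===== SOURCE A (Python) =====
-- def _expand_n(pam):
--     if 'N' not in pam:
--         return [pam]
--     results = ['']
--     for base in pam:
--         if base == 'N':
--             results = [r + b for r in results for b in 'ATGC']
--         else:
--             results = [r + base for r in results]
--     return results
-- ===== SOURCE B (Python) =====
-- import itertools
--
-- def _expand_n(pam):
--     n_positions = [i for i, c in enumerate(pam) if c == 'N']
--     if not n_positions:
--         return [pam]
--     out = []
--     for combo in itertools.product('ATGC', repeat=len(n_positions)):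
--         it = iter(combo)
--         out.append(''.join(next(it) if c == 'N' else c for c in pam))
--     return out
-- ===== Notes on version B (the rewrite author's own statement) =====
-- stated objective: idiomatic
-- what changed: Instead of growing the result list character by character with repeated list comprehensions, B precomputes the wildcard positions, takes the cartesian product of the four bases over them via itertools.product, and builds each output string in one substitution pass.
import Mathlib
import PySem

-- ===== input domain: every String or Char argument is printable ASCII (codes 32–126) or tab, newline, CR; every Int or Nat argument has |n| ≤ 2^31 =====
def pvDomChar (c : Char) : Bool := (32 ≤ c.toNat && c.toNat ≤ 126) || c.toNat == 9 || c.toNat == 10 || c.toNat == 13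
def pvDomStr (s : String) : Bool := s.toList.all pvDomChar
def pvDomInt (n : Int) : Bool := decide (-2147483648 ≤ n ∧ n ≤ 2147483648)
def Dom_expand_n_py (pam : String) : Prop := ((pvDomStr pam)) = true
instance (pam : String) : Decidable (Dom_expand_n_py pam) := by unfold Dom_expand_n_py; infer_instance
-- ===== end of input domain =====

-- B replaces A's incremental left-to-right list growth by substitution of each combo from the
-- precomputed cartesian product of 'ATGC' choices into the N positions (objective: idiomatic).

-- ===== PORT A =====
-- for base in pam: rebuild `results` by the two comprehensions (r + b / r + base = String.push)
def expand_n_py (pam : String) : List String :=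
  if ¬ pam.toList.contains 'N' then [pam]
  else
    pam.toList.foldl
      (fun results base =>
        if base == 'N' then
          results.flatMap (fun r => "ATGC".toList.map (fun b => r.push b))
        else
          results.map (fun r => r.push base))
      [""]

-- ===== PORT B =====
-- itertools.product('ATGC', repeat=k): first coordinate varies slowest
def pvProdATGC : Nat → List (List Char)
  | 0 => [[]]
  | k + 1 => "ATGC".toList.flatMap (fun b => (pvProdATGC k).map (fun rest => b :: rest))

-- ''.join(next(it) if c == 'N' else c for c in pam): consume the combo at each 'N'
def pvSubst : List Char → List Char → List Char
  | [], _ => []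
  | c :: cs, combo =>
    if c == 'N' then
      match combo with
      | b :: rest => b :: pvSubst cs rest
      | [] => pvSubst cs []   -- unreachable: combo always has one entry per 'N'
    else c :: pvSubst cs combo

def expand_n_py_alt (pam : String) : List String :=
  let n_positions := (PySem.List.enumerate pam.toList).filterMap
    (fun ic => if ic.2 == 'N' then some ic.1 else none)
  if n_positions = [] then [pam]
  else (pvProdATGC n_positions.length).map (fun combo => String.ofList (pvSubst pam.toList combo))

-- ===== PRECONDITION & SPEC =====
def Spec_expand_n_py (pam : String) (out : List String) : Prop := out = expand_n_py_alt pam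
instance (pam : String) (out : List String) : Decidable (Spec_expand_n_py pam out) := by unfold Spec_expand_n_py; infer_instance

-- ===== CLAIM (what is proved, stated in full; the proofs are below) =====
def Claim_equal_expand_n_py : Prop := ∀ (pam : String), Dom_expand_n_py pam → Spec_expand_n_py pam (expand_n_py pam)

-- ===== LEMMAS AND PROOFS =====

-- suffix-wise expansion: the common reference both ports are reduced to
def pvExp : List Char → List (List Char)
  | [] => [[]]
  | c :: cs =>
    if c == 'N' then "ATGC".toList.flatMap (fun b => (pvExp cs).map (fun t => b :: t))
    else (pvExp cs).map (fun t => c :: t)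

theorem pv_push_append (s : String) (b : Char) (t : List Char) :
    (s.push b) ++ String.ofList t = s ++ String.ofList (b :: t) := by
  apply String.toList_inj.mp; simp

theorem pv_foldA (cs : List Char) (acc : List String) :
    cs.foldl
      (fun results base =>
        if base == 'N' then
          results.flatMap (fun r => "ATGC".toList.map (fun b => r.push b))
        else
          results.map (fun r => r.push base))
      acc
    = acc.flatMap (fun r => (pvExp cs).map (fun t => r ++ String.ofList t)) := by
  induction cs generalizing acc with
  | nil => simp [pvExp]
  | cons c cs ih =>
    simp only [List.foldl_cons]
    by_cases hc : c == 'N'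
    · rw [ih]
      simp only [pvExp, hc, if_pos]
      rw [List.flatMap_assoc]
      congr 1
      funext r
      simp [pv_push_append, Function.comp_def]
    · rw [ih]
      simp [pvExp, hc, List.flatMap_map, List.map_map, Function.comp_def, pv_push_append]

theorem pv_countN (cs : List Char) (s : Int) :
    ((PySem.List.enumerate cs s).filterMap
      (fun ic => if ic.2 == 'N' then some ic.1 else none)).length
    = cs.countP (fun c => c == 'N') := by
  induction cs generalizing s with
  | nil => simp [PySem.List.enumerate_nil]
  | cons c cs ih =>
    rw [PySem.List.enumerate_cons, List.filterMap_cons]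
    by_cases hc : c = 'N' <;>
      simp [hc] <;> simpa using ih (s + 1)

theorem pv_subst_prod (cs : List Char) :
    (pvProdATGC (cs.countP (fun c => c == 'N'))).map (pvSubst cs) = pvExp cs := by
  induction cs with
  | nil => simp [pvProdATGC, pvSubst, pvExp]
  | cons c cs ih =>
    by_cases hc : c == 'N'
    · simp only [List.countP_cons, hc, if_pos, pvProdATGC, pvExp]
      rw [← ih]
      simp only [List.map_flatMap, List.map_map, Function.comp_def]
      refine List.flatMap_congr (fun b _ => ?_)
      refine List.map_congr_left (fun combo _ => ?_)
      simp [pvSubst, hc]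
    · simp only [List.countP_cons, hc, pvExp]
      rw [← ih]
      rw [List.map_map]
      refine List.map_congr_left (fun combo _ => ?_)
      simp [pvSubst, hc]

-- ===== VERDICT (by name: the statement is the Claim_ definition above) =====
theorem expand_n_py_spec : Claim_equal_expand_n_py := by
  intro pam _
  show expand_n_py pam = expand_n_py_alt pam
  simp only [expand_n_py, expand_n_py_alt]
  have hlen := pv_countN pam.toList 0
  by_cases hN : 'N' ∈ pam.toList
  · rw [if_neg (by simpa using hN)]
    rw [if_neg (by
      intro hnil
      have h0 : pam.toList.countP (fun c => c == 'N') = 0 := by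
        rw [← hlen, hnil]; rfl
      rw [List.countP_eq_zero] at h0
      exact (by simpa using h0 'N' hN : False))]
    rw [pv_foldA, hlen]
    have : (fun combo => String.ofList (pvSubst pam.toList combo))
        = String.ofList ∘ pvSubst pam.toList := rfl
    rw [this, ← List.map_map, pv_subst_prod]
    simp
  · rw [if_pos (by simpa using hN)]
    rw [if_pos (by
      rw [← List.length_eq_zero_iff, hlen, List.countP_eq_zero]
      intro a ha hNa
      rw [show a = 'N' by simpa using hNa] at ha
      exact hN ha)]
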